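-- pv_equiv track=rewrite | github.com/PolinaSavelyeva/Exers | Yandex_algorithms_6.0/Homeworks/2/H.py | native
-- ===== SOURCE A (Python) =====
-- def native(n, a):
--     ans = 0
--     for space in range(n):
--         ans += a[space] * space
--
--     for open_space in range(n):
--         p = 0
--         for space in range(n):
--             p += a[space] * abs(open_space - space)
--         ans = min(ans, p)
--     return ans
-- ===== SOURCE B (Python) =====
-- def native(n, a):
--     # O(n) via incremental update: cost(o+1) = cost(o) + 2*prefix(o+1) - total
--     if n <= 0:
--         return 0
--     pre = a[:n]
--     total = sum(pre)
--     cost = sum(i * x for i, x in enumerate(pre))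
--     best = cost
--     left = 0
--     for x in pre[:-1]:
--         left += x
--         cost += 2 * left - total
--         if cost < best:
--             best = cost
--     return best
-- ===== Notes on version B (the rewrite author's own statement) =====
-- stated objective: faster
-- what changed: Replaces the O(n^2) double loop (recomputing each position's weighted-distance cost from scratch) with a single pass that updates the cost incrementally from a running prefix sum: cost(o+1) = cost(o) + 2*prefix(o+1) - total.
import Mathlib
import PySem

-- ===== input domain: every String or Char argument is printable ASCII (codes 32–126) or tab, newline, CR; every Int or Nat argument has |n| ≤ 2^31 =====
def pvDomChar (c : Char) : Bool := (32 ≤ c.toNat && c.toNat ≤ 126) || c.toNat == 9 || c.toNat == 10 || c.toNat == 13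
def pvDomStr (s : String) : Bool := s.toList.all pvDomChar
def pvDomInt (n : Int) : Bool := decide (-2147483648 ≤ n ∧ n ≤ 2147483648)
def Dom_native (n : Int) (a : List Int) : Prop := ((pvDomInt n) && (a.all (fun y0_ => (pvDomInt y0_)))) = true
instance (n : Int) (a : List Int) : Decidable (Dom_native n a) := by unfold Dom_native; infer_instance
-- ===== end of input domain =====

-- B replaces A's O(n^2) double loop by one incremental-cost pass over a prefix sum (measured faster, asymptotic).


-- ===== PORT A =====
def native (n : Int) (a : List Int) : Int :=
  let ans : Int :=
    (PySem.List.pyRange 0 n 1).foldl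
      (fun ans space => ans + PySem.List.pyGetD a space 0 * space) 0
  (PySem.List.pyRange 0 n 1).foldl
    (fun ans open_space =>
      let p : Int :=
        (PySem.List.pyRange 0 n 1).foldl
          (fun p space => p + PySem.List.pyGetD a space 0 * ((open_space - space).natAbs : Int)) 0
      min ans p)
    ans

-- ===== PORT B =====
def native_alt (n : Int) (a : List Int) : Int :=
  if n ≤ 0 then 0
  else
    let pre := PySem.List.slice a none (some n)
    let total := pre.sum
    let cost := (PySem.List.enumerate pre).foldl (fun s ix => s + ix.1 * ix.2) 0
    let r := (PySem.List.slice pre none (some (-1))).foldl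
      (fun (st : Int × Int × Int) x =>
        let left := st.1 + x
        let cost := st.2.1 + 2 * left - total
        (left, cost, if cost < st.2.2 then cost else st.2.2))
      (0, cost, cost)
    r.2.2

-- ===== PRECONDITION & SPEC =====
-- Pre_: A indexes a[space] for every space in range(n); it raises IndexError iff n > len(a).
def Pre_native (n : Int) (a : List Int) : Prop := n ≤ (a.length : Int)
instance (n : Int) (a : List Int) : Decidable (Pre_native n a) := by unfold Pre_native; infer_instance
def pvWitness_native : Int × List Int := (3, [2, -1, 4])

def Spec_native (n : Int) (a : List Int) (out : Int) : Prop := out = native_alt n a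
instance (n : Int) (a : List Int) (out : Int) : Decidable (Spec_native n a out) := by unfold Spec_native; infer_instance

-- ===== CLAIM (what is proved, stated in full; the proofs are below) =====
def Claim_equal_native : Prop := ∀ (n : Int) (a : List Int), Dom_native n a → Pre_native n a → Spec_native n a (native n a)

-- ===== LEMMAS AND PROOFS =====

-- total weighted-distance cost of opening at position o, structurally over the list
def costL : List Int → Int → Int
  | [], _ => 0
  | x :: xs, o => x * (o.natAbs : Int) + costL xs (o - 1)

theorem costL_append (xs : List Int) (x : Int) (o : Int) :
    costL (xs ++ [x]) o = costL xs o + x * ((o - (xs.length : Int)).natAbs : Int) := by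
  induction xs generalizing o with
  | nil => simp [costL]
  | cons y ys ih =>
      simp only [List.cons_append, costL, ih, List.length_cons]
      push_cast
      ring_nf

theorem costL_neg (xs : List Int) (o : Int) (h : o ≤ 0) :
    costL xs (o - 1) = costL xs o + xs.sum := by
  induction xs generalizing o with
  | nil => simp [costL]
  | cons x ys ih =>
      simp only [costL, List.sum_cons]
      rw [show o - 1 - 1 = (o - 1) - 1 from rfl, ih (o - 1) (by omega)]
      have : ((o - 1).natAbs : Int) = (o.natAbs : Int) + 1 := by omega
      rw [this]; ring

theorem costL_step (xs : List Int) (o : Int) (h : 0 ≤ o) :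
    costL xs (o + 1) = costL xs o + (xs.take (o.toNat + 1)).sum - (xs.drop (o.toNat + 1)).sum := by
  induction xs generalizing o with
  | nil => simp [costL]
  | cons x ys ih =>
      simp only [costL]
      have htake : (x :: ys).take (o.toNat + 1) = x :: ys.take o.toNat := by simp
      have hdrop : (x :: ys).drop (o.toNat + 1) = ys.drop o.toNat := by simp
      rw [htake, hdrop, List.sum_cons]
      have habs : ((o + 1).natAbs : Int) = (o.natAbs : Int) + 1 := by omega
      rw [habs]
      rcases eq_or_lt_of_le h with h0 | h0
      · have ho : o = 0 := h0.symm
        subst ho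
        have hneg : costL ys (-1) = costL ys 0 + ys.sum := by
          simpa using costL_neg ys 0 le_rfl
        rw [show (0:Int) + 1 - 1 = 0 from by ring, show (0:Int) - 1 = -1 from by ring, hneg]
        simp only [Int.natAbs_zero, Nat.cast_zero, Int.toNat_zero, List.take_zero,
          List.sum_nil, List.drop_zero]
        ring
      · have h1 : (0:Int) ≤ o - 1 := by omega
        have h2 : (o - 1).toNat = o.toNat - 1 := by omega
        have h3 : o.toNat - 1 + 1 = o.toNat := by omega
        have hih := ih (o - 1) h1
        rw [h2, h3] at hih
        rw [show o + 1 - 1 = (o - 1) + 1 from by ring, hih]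
        ring

theorem costL_take_add (a : List Int) (m : Nat) (hm : m < a.length) (o : Int) :
    costL (a.take (m + 1)) o = costL (a.take m) o + a.getD m 0 * ((o - (m : Int)).natAbs : Int) := by
  have h : a.take (m + 1) = a.take m ++ [a[m]] := by
    rw [List.take_succ]
    simp [List.getElem?_eq_getElem hm]
  rw [h, costL_append, List.length_take, List.getD_eq_getElem a 0 hm]
  congr 3
  omega

theorem foldl_range_cost (a : List Int) (o : Int) :
    ∀ (m : Nat), m ≤ a.length → ∀ (init : Int),
      (List.range m).foldl (fun p k => p + a.getD k 0 * ((o - (k : Int)).natAbs : Int)) init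
        = init + costL (a.take m) o := by
  intro m
  induction m with
  | zero => intro _ init; simp [costL]
  | succ m ih =>
      intro hm init
      rw [List.range_succ, List.foldl_append, ih (by omega) init]
      simp only [List.foldl_cons, List.foldl_nil]
      rw [costL_take_add a m (by omega) o]
      ring

theorem enum_fold_cost (xs : List Int) :
    ∀ (t : Nat) (acc : Int),
      (PySem.List.enumerate xs (t : Int)).foldl (fun s ix => s + ix.1 * ix.2) acc
        = acc + costL xs (-(t : Int)) := by
  induction xs with
  | nil => intro t acc; simp [PySem.List.enumerate_nil, costL]
  | cons x ys ih =>
      intro t acc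
      rw [PySem.List.enumerate_cons, List.foldl_cons]
      rw [show ((t : Int) + 1) = ((t + 1 : Nat) : Int) from by push_cast; ring, ih (t + 1)]
      simp only [costL]
      rw [show ((-(t:Int)).natAbs : Int) = (t : Int) from by omega,
          show (-(t:Int)) - 1 = -(((t + 1 : Nat) : Int)) from by push_cast; ring]
      ring

theorem if_lt_eq_min (b c : Int) : (if c < b then c else b) = min b c := by
  rw [min_def]; split_ifs <;> omega

-- B's loop invariant: after k steps left = prefix sum, cost = costL pre k, best = running min
theorem b_loop_inv (pre : List Int) (k : Nat) (hk : k + 1 ≤ pre.length) :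
    (pre.take k).foldl
      (fun (st : Int × Int × Int) x =>
        let left := st.1 + x
        let cost := st.2.1 + 2 * left - pre.sum
        (left, cost, if cost < st.2.2 then cost else st.2.2))
      (0, costL pre 0, costL pre 0)
    = ((pre.take k).sum, costL pre (k : Int),
       (List.range k).foldl (fun b (j : Nat) => min b (costL pre ((j : Int) + 1))) (costL pre 0)) := by
  induction k with
  | zero => simp
  | succ k ih =>
      have hk' : k < pre.length := by omega
      have htake : pre.take (k + 1) = pre.take k ++ [pre[k]] := by
        rw [List.take_succ]; simp [List.getElem?_eq_getElem hk']
      rw [htake, List.foldl_append, ih (by omega)]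
      simp only [List.foldl_cons, List.foldl_nil]
      have hcost : costL pre ((k : Int)) + 2 * ((pre.take k).sum + pre[k]) - pre.sum
          = costL pre ((k : Int) + 1) := by
        have hstep := costL_step pre (k : Int) (by positivity)
        rw [show ((k : Int)).toNat = k from by omega] at hstep
        have hsplit : (pre.take (k + 1)).sum + (pre.drop (k + 1)).sum = pre.sum := by
          rw [← List.sum_append, List.take_append_drop]
        have htk : (pre.take (k + 1)).sum = (pre.take k).sum + pre[k] := by
          rw [htake, List.sum_append, List.sum_cons, List.sum_nil]; ring
        omega
      rw [List.range_succ, List.foldl_append]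
      simp only [List.foldl_cons, List.foldl_nil, Prod.mk.injEq]
      refine ⟨by rw [List.sum_append, List.sum_cons, List.sum_nil]; ring, ?_, ?_⟩
      · rw [hcost]; norm_cast
      · rw [hcost, if_lt_eq_min]

-- min-fold peeling: the k = 0 term of A's outer loop is absorbed into the initial value
theorem min_fold_peel (m : Nat) (f : Nat → Int) :
    (List.range (m + 1)).foldl (fun ansk k => min ansk (f k)) (f 0)
      = (List.range m).foldl (fun b j => min b (f (j + 1))) (f 0) := by
  rw [List.range_succ_eq_map, List.foldl_cons, List.foldl_map, min_self]

-- A's value in closed form: fold of min over costL of the first n.toNat elements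
theorem native_closed (n : Int) (a : List Int) (_h0 : 0 < n) (hlen : n.toNat ≤ a.length) :
    native n a = (List.range n.toNat).foldl
      (fun ans (k : Nat) => min ans (costL (a.take n.toNat) (k : Int)))
      (costL (a.take n.toNat) 0) := by
  unfold native
  simp only [PySem.List.pyRange_one, Int.sub_zero, List.foldl_map, zero_add,
    PySem.List.pyGetD_natCast]
  have hinit : (List.range n.toNat).foldl (fun ans (k : Nat) => ans + a.getD k 0 * (k : Int)) 0
      = costL (a.take n.toNat) 0 := by
    have h := foldl_range_cost a 0 n.toNat hlen 0
    simp only [zero_sub, Int.natAbs_neg, Int.natAbs_natCast, zero_add] at h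
    exact h
  have hin : ∀ o : Int,
      (List.range n.toNat).foldl (fun p (k : Nat) => p + a.getD k 0 * ((o - (k:Int)).natAbs : Int)) 0
        = costL (a.take n.toNat) o := by
    intro o
    simpa using foldl_range_cost a o n.toNat hlen 0
  rw [hinit]
  congr 1
  funext ans k
  rw [hin (k : Int)]

-- B's value in closed form
theorem alt_closed (n : Int) (a : List Int) (h0 : 0 < n) (hlen : n.toNat ≤ a.length) :
    native_alt n a = (List.range (n.toNat - 1)).foldl
      (fun b (j : Nat) => min b (costL (a.take n.toNat) ((j : Int) + 1)))
      (costL (a.take n.toNat) 0) := by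
  unfold native_alt
  rw [if_neg (by omega)]
  simp only [PySem.List.slice_to a h0.le, PySem.List.slice_to_neg_one]
  have hplen : (a.take n.toNat).length = n.toNat := by
    rw [List.length_take]; omega
  have hcost0 : (PySem.List.enumerate (a.take n.toNat) 0).foldl (fun s ix => s + ix.1 * ix.2) 0
      = costL (a.take n.toNat) 0 := by
    simpa using enum_fold_cost (a.take n.toNat) 0 0
  rw [hcost0, List.dropLast_eq_take, hplen,
    b_loop_inv (a.take n.toNat) (n.toNat - 1) (by omega)]

-- ===== VERDICT (by name: the statement is the Claim_ definition above) =====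
theorem native_spec : Claim_equal_native := by
  intro n a _ hpre
  unfold Spec_native
  by_cases hn : n ≤ 0
  · unfold native native_alt
    rw [if_pos hn, PySem.List.pyRange_one_eq_nil hn]
    simp
  · have h0 : 0 < n := by omega
    have hlen : n.toNat ≤ a.length := by
      unfold Pre_native at hpre; omega
    rw [native_closed n a h0 hlen, alt_closed n a h0 hlen]
    have hm : n.toNat = (n.toNat - 1) + 1 := by omega
    have hpeel := min_fold_peel (n.toNat - 1) (fun k : Nat => costL (a.take n.toNat) (k : Int))
    rw [← hm] at hpeel
    simp only [Nat.cast_zero, Nat.cast_add, Nat.cast_one] at hpeel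
    exact hpeel
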